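-- pv_equiv track=rewrite | github.com/pubnub/pubnub-blocks-ansible | module/mock/mock_module.py | _is_key_in_list
-- ===== SOURCE A (Python) =====
-- def _is_key_in_list(key, keys):
--     """Check whether specified key is in list.
--
--     Check allow  to verify against regular key as well as against keys with wildcard.
--     :type key:   str
--     :param key:  Reference on key against which check should be done.
--     :type keys:  list
--     :param keys: Reference on list of keys which should be used for reference.
--     :rtype:  bool
--     :return: 'True' in case if specified 'key' is inside of 'keys' list.
--     """
--     in_list = key in keys
--     if not in_list:
--         for _key in keys:
--             in_list = _key.endswith('*') and key.startswith(_key[:-1])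
--             if in_list:
--                 break
--
--     return in_list
-- ===== SOURCE B (Python) =====
-- def _is_key_in_list(key, keys):
--     """Hash the keys once, then probe candidate patterns by direct lookup.
--
--     A wildcard pattern p+'*' matches key iff p is a prefix of key, so instead of
--     scanning the list per pattern we collect the prefix lengths occurring among
--     wildcard patterns and look up key[:i] + '*' in a set for each such length.
--     """
--     patterns = set(keys)
--     if key in patterns:
--         return True
--     prefix_lengths = {len(k) - 1 for k in patterns if k.endswith('*')}
--     for i in prefix_lengths:
--         if i <= len(key) and key[:i] + '*' in patterns:
--             return True
--     return False
-- ===== Notes on version B (the rewrite author's own statement) =====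
-- stated objective: alternative
-- what changed: Instead of scanning the key list and testing each element (exact or wildcard) against the key, B builds a set of the keys once, collects the prefix lengths occurring among wildcard patterns, and probes membership of the key itself and of key[:i]+'*' for each such length, inverting the traversal from the list to direct set lookups of candidate patterns.
import Mathlib
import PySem

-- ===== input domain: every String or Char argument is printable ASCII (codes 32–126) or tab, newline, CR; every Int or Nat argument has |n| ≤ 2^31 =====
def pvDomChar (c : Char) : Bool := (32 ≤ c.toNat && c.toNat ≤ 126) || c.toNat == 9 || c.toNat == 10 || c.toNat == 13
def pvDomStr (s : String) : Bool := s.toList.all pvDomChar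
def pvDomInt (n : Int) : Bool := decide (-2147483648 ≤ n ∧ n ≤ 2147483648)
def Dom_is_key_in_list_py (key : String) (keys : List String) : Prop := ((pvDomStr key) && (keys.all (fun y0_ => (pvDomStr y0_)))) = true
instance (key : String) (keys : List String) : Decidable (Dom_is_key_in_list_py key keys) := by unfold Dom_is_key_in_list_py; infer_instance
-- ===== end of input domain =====

-- B builds a set of the keys once and probes the key and key[:i]+'*' for each prefix
-- length i occurring among wildcard patterns, inverting the traversal from the key
-- list to direct set lookups of candidate patterns; objective: alternative.

-- ===== PORT A =====
-- the loop-body predicate: _key.endswith('*') and key.startswith(_key[:-1])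
def pvWild (key k : String) : Bool :=
  PySem.Str.endswith k "*" && PySem.Str.startswith key (PySem.Str.slice k none (some (-1)))

-- the wildcard for-loop: state 'in_list' is reassigned each iteration, break on True
def pvAWildLoop (key : String) : List String → Bool → Bool
  | [], in_list => in_list
  | k :: rest, _ =>
      let in_list := pvWild key k
      if in_list then in_list else pvAWildLoop key rest in_list

def is_key_in_list_py (key : String) (keys : List String) : Bool :=
  let in_list := keys.contains key
  if !in_list then pvAWildLoop key keys in_list
  else in_list

-- ===== PORT B =====
-- the candidate pattern key[:i] + '*'
def pvCand (key : String) (i : Int) : String :=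
  PySem.Str.slice key none (some i) ++ "*"

-- the set comprehension {len(k) - 1 for k in patterns if k.endswith('*')}
def pvPrefixLengths (patterns : PySem.Set String) : PySem.Set Int :=
  PySem.Set.ofList ((patterns.filter (fun k => PySem.Str.endswith k "*")).map
    (fun k => PySem.Str.len k - 1))

-- the for-loop over the prefix lengths: return True on a hit, else fall through
def pvLenLoop (key : String) (patterns : PySem.Set String) : List Int → Bool
  | [] => false
  | i :: rest =>
      if i ≤ PySem.Str.len key && PySem.Set.contains patterns (pvCand key i) then true
      else pvLenLoop key patterns rest

def is_key_in_list_py_alt (key : String) (keys : List String) : Bool :=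
  let patterns : PySem.Set String := PySem.Set.ofList keys
  if PySem.Set.contains patterns key then true
  else pvLenLoop key patterns (pvPrefixLengths patterns)

-- ===== PRECONDITION & SPEC =====
def Spec_is_key_in_list_py (key : String) (keys : List String) (out : Bool) : Prop := out = is_key_in_list_py_alt key keys
instance (key : String) (keys : List String) (out : Bool) : Decidable (Spec_is_key_in_list_py key keys out) := by unfold Spec_is_key_in_list_py; infer_instance

-- ===== CLAIM (what is proved, stated in full; the proofs are below) =====
def Claim_equal_is_key_in_list_py : Prop := ∀ (key : String) (keys : List String), Dom_is_key_in_list_py key keys → Spec_is_key_in_list_py key keys (is_key_in_list_py key keys)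

-- ===== LEMMAS AND PROOFS =====

-- A's wildcard loop is an 'any' over the same predicate
theorem pvAWildLoop_eq_any (key : String) (keys : List String) :
    pvAWildLoop key keys false = keys.any (pvWild key) := by
  induction keys with
  | nil => rfl
  | cons k rest ih =>
      simp only [pvAWildLoop, List.any_cons]
      by_cases h : pvWild key k = true
      · simp [h]
      · simp only [Bool.not_eq_true] at h
        simp [h, ih]

-- B's length loop is an 'any' over the length list
theorem pvLenLoop_eq_any (key : String) (patterns : PySem.Set String) (l : List Int) :
    pvLenLoop key patterns l
      = l.any (fun i => i ≤ PySem.Str.len key && PySem.Set.contains patterns (pvCand key i)) := by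
  induction l with
  | nil => rfl
  | cons i rest ih =>
      simp only [pvLenLoop, List.any_cons]
      rw [ih]
      cases hc : (decide (i ≤ PySem.Str.len key) && PySem.Set.contains patterns (pvCand key i)) <;>
        simp

-- the characterisation: A's per-element wildcard test holds iff k is some prefix of key followed by '*'
theorem pvWild_iff (key k : String) :
    pvWild key k = true ↔ ∃ p, p <+: key.toList ∧ k.toList = p ++ ['*'] := by
  have hstar : ("*" : String).toList = ['*'] := rfl
  unfold pvWild
  rw [Bool.and_eq_true, PySem.Str.endswith_eq, PySem.Chars.endswith_iff,
      PySem.Str.startswith_eq, PySem.Chars.startswith_iff, PySem.Str.slice_to_neg_one, hstar]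
  constructor
  · rintro ⟨⟨p, hp⟩, hpre⟩
    have hd : k.toList.dropLast = p := by rw [← hp, List.dropLast_concat]
    rw [hd] at hpre
    exact ⟨p, hpre, hp.symm⟩
  · rintro ⟨p, hppre, hk⟩
    have hd : k.toList.dropLast = p := by rw [hk, List.dropLast_concat]
    exact ⟨⟨p, hk.symm⟩, by rw [hd]; exact hppre⟩

-- B's candidate at i (0 ≤ i) has the prefix-plus-star character list
theorem pvCand_toList (key : String) (i : Int) (h : 0 ≤ i) :
    (pvCand key i).toList = key.toList.take i.toNat ++ ['*'] := by
  have hstar : ("*" : String).toList = ['*'] := rfl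
  unfold pvCand
  rw [String.toList_append, PySem.Str.toList_slice, PySem.Chars.slice_eq_listSlice,
      PySem.List.slice_to key.toList h, hstar]

-- membership in the comprehension's set
theorem pvMem_prefixLengths (keys : List String) (i : Int) :
    i ∈ pvPrefixLengths (PySem.Set.ofList keys)
      ↔ ∃ k ∈ keys, PySem.Str.endswith k "*" = true ∧ i = PySem.Str.len k - 1 := by
  unfold pvPrefixLengths
  rw [PySem.Set.mem_ofList, List.mem_map]
  constructor
  · rintro ⟨k, hk, rfl⟩
    rw [List.mem_filter, PySem.Set.mem_ofList] at hk
    exact ⟨k, hk.1, hk.2, rfl⟩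
  · rintro ⟨k, hk, he, rfl⟩
    refine ⟨k, ?_, rfl⟩
    rw [List.mem_filter, PySem.Set.mem_ofList]
    exact ⟨hk, he⟩

-- the two 'any's agree
theorem pvAny_eq (key : String) (keys : List String) :
    keys.any (pvWild key)
      = (pvPrefixLengths (PySem.Set.ofList keys)).any
          (fun i => i ≤ PySem.Str.len key
            && PySem.Set.contains (PySem.Set.ofList keys) (pvCand key i)) := by
  have h2 : key.toList.length = key.length := by simp
  rw [Bool.eq_iff_iff, List.any_eq_true, List.any_eq_true]
  constructor
  · rintro ⟨k, hk, hw⟩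
    have hend : PySem.Str.endswith k "*" = true := by
      have hw' := hw
      unfold pvWild at hw'
      rw [Bool.and_eq_true] at hw'
      exact hw'.1
    obtain ⟨p, hp, hkl⟩ := (pvWild_iff key k).mp hw
    have hlen : PySem.Str.len k - 1 = (p.length : Int) := by
      have : k.toList.length = p.length + 1 := by rw [hkl]; simp
      simp only [PySem.Str.len_eq]
      have h3 : k.toList.length = k.length := by simp
      omega
    refine ⟨(p.length : Int), ?_, ?_⟩
    · exact (pvMem_prefixLengths keys _).mpr ⟨k, hk, hend, hlen.symm⟩
    · rw [Bool.and_eq_true]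
      constructor
      · have hle := hp.length_le
        simp only [PySem.Str.len_eq, decide_eq_true_eq]
        omega
      · rw [PySem.Set.contains_iff, PySem.Set.mem_ofList]
        have hcand : (pvCand key (p.length : Int)).toList = p ++ ['*'] := by
          rw [pvCand_toList key _ (by positivity)]
          congr 1
          simpa using (List.prefix_iff_eq_take.mp hp).symm
        have heq : pvCand key (p.length : Int) = k :=
          String.toList_inj.mp (by rw [hcand, hkl])
        rwa [heq]
  · rintro ⟨i, hi, hc⟩
    obtain ⟨k', hk', hend', hi'⟩ := (pvMem_prefixLengths keys i).mp hi
    have hnz : k'.toList ≠ [] := by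
      rw [PySem.Str.endswith_eq, PySem.Chars.endswith_iff] at hend'
      obtain ⟨t, ht⟩ := hend'
      intro hnil
      rw [hnil] at ht
      exact absurd (congrArg List.length ht) (by simp [show ("*":String).toList = ['*'] from rfl])
    have hpos : 0 ≤ i := by
      have h3 : k'.toList.length = k'.length := by simp
      have : 1 ≤ k'.toList.length := by
        cases h : k'.toList with
        | nil => exact absurd h hnz
        | cons a t => simp
      simp only [PySem.Str.len_eq] at hi'
      omega
    rw [Bool.and_eq_true] at hc
    rw [PySem.Set.contains_iff, PySem.Set.mem_ofList] at hc
    refine ⟨pvCand key i, hc.2, ?_⟩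
    rw [pvWild_iff]
    exact ⟨key.toList.take i.toNat, List.take_prefix _ _, pvCand_toList key i hpos⟩

-- ===== VERDICT (by name: the statement is the Claim_ definition above) =====
theorem is_key_in_list_py_spec : Claim_equal_is_key_in_list_py := by
  intro key keys _
  unfold Spec_is_key_in_list_py is_key_in_list_py is_key_in_list_py_alt
  by_cases hk : key ∈ keys
  · simp [hk, PySem.Set.mem_ofList]
  · simp [hk, PySem.Set.mem_ofList, pvAWildLoop_eq_any, pvLenLoop_eq_any, pvAny_eq key keys]
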